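-- pv_equiv track=rewrite | github.com/HITOfficial/College | ASD/Kolokwia/2020_zad2.py | nuber_as_as_sum_others
-- ===== SOURCE A (Python) =====
-- def nuber_as_as_sum_others(T):
--     # algo n^3 w najgroszym przypadku
--     for i in range(len(T)):
--         is_a_sum_of_others = False # zakładam, początkowo, że nie jest
--         for j in range(len(T)):
--             if j == i:
--                 continue
--             for k in range(len(T)):
--                 if k == j or k == i:
--                     continue # warunek żeby nie brać dwa razy tej samej liczby
--                 if T[i] == T[j]+T[k]:
--                     is_a_sum_of_others = True
--                     break
--             if is_a_sum_of_others:
--                 break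
--         if is_a_sum_of_others == False:
--             return False
--     return True
-- ===== SOURCE B (Python) =====
-- def nuber_as_as_sum_others(T):
--     # O(n*d): value-count map built once; per element, two-sum over distinct values
--     counts = {}
--     for v in T:
--         counts[v] = counts.get(v, 0) + 1
--     for x in T:
--         found = False
--         for a in counts:
--             b = x - a
--             if a == b:
--                 if counts.get(a, 0) - (1 if a == x else 0) >= 2:
--                     found = True
--                     break
--             else:
--                 if counts.get(a, 0) - (1 if a == x else 0) >= 1 and counts.get(b, 0) - (1 if b == x else 0) >= 1:
--                     found = True
--                     break
--         if not found:
--             return False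
--     return True
-- ===== Notes on version B (the rewrite author's own statement) =====
-- stated objective: faster
-- what changed: Replaces A's O(n^3) triple nested index scan by a value-count dictionary built once, then for each element a two-sum check over the distinct values using count corrections to exclude the element itself.
import Mathlib
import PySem

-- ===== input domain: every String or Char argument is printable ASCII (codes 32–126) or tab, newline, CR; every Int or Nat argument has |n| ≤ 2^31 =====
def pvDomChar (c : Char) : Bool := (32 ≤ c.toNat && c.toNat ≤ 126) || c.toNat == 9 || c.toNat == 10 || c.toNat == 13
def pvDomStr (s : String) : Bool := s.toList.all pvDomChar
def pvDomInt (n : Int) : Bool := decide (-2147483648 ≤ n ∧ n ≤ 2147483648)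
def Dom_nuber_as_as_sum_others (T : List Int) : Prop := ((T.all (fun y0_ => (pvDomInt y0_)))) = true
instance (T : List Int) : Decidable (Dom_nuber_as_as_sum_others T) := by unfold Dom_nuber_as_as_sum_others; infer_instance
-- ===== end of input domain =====

-- B replaces A's O(n^3) triple index loop by a value-count map built once plus a
-- per-element two-sum over the distinct values (objective: faster).

-- ===== PORT A =====
-- T[m] for an index m produced by range(len(T)) is always in range, so pyGetD's default 0 is never used.
def pvAGet (T : List Int) (m : Int) : Int := PySem.List.pyGetD T m 0

-- innermost 'for k' loop with its continue/break (flag returned as the Bool)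
def pvA_k (T : List Int) (i j : Int) : List Int → Bool
  | [] => false
  | k :: ks =>
    if k = j ∨ k = i then pvA_k T i j ks
    else if pvAGet T i = pvAGet T j + pvAGet T k then true
    else pvA_k T i j ks

-- 'for j' loop: skip j == i, break when the inner loop set the flag
def pvA_j (T : List Int) (i : Int) : List Int → Bool
  | [] => false
  | j :: js =>
    if j = i then pvA_j T i js
    else if pvA_k T i j (PySem.List.pyRange 0 (T.length : Int) 1) then true
    else pvA_j T i js

-- 'for i' loop: return False as soon as one element is not a sum of two others
def pvA_i (T : List Int) : List Int → Bool
  | [] => true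
  | i :: is =>
    if pvA_j T i (PySem.List.pyRange 0 (T.length : Int) 1) then pvA_i T is
    else false

def nuber_as_as_sum_others (T : List Int) : Bool :=
  pvA_i T (PySem.List.pyRange 0 (T.length : Int) 1)

-- ===== PORT B =====
-- counts.get(v, 0) - (1 if v == x else 0)
def pvBAvail (counts : PySem.Dict Int Int) (x v : Int) : Int :=
  counts.getD v 0 - (if v = x then 1 else 0)

-- 'for a in counts' with the found/break flag as the returned Bool
def pvB_inner (counts : PySem.Dict Int Int) (x : Int) : List Int → Bool
  | [] => false
  | a :: as =>
    let b := x - a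
    if a = b then
      if 2 ≤ pvBAvail counts x a then true else pvB_inner counts x as
    else
      if 1 ≤ pvBAvail counts x a ∧ 1 ≤ pvBAvail counts x b then true
      else pvB_inner counts x as

-- 'for x in T': return False as soon as no pair is found
def pvB_outer (counts : PySem.Dict Int Int) : List Int → Bool
  | [] => true
  | x :: xs => if pvB_inner counts x counts.keys then pvB_outer counts xs else false

def nuber_as_as_sum_others_alt (T : List Int) : Bool :=
  let counts := T.foldl (fun d v => d.insert v (d.getD v 0 + 1)) PySem.Dict.empty
  pvB_outer counts T

-- ===== PRECONDITION & SPEC =====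
def Spec_nuber_as_as_sum_others (T : List Int) (out : Bool) : Prop := out = nuber_as_as_sum_others_alt T
instance (T : List Int) (out : Bool) : Decidable (Spec_nuber_as_as_sum_others T out) := by unfold Spec_nuber_as_as_sum_others; infer_instance

-- ===== CLAIM (what is proved, stated in full; the proofs are below) =====
def Claim_equal_nuber_as_as_sum_others : Prop := ∀ (T : List Int), Dom_nuber_as_as_sum_others T → Spec_nuber_as_as_sum_others T (nuber_as_as_sum_others T)

-- ===== LEMMAS AND PROOFS =====

-- the common mathematical reading: x can be written as T[j] + T[k] with j ≠ k, both ≠ a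
-- distinguished occurrence of x; stated purely in terms of counts
def pvAvailZ (T : List Int) (x v : Int) : Int := (T.count v : Int) - (if v = x then 1 else 0)

def pvQ (T : List Int) (x : Int) : Prop :=
  ∃ a ∈ T, (if a = x - a then 2 ≤ pvAvailZ T x a
            else 1 ≤ pvAvailZ T x a ∧ 1 ≤ pvAvailZ T x (x - a))

-- ----- A-side characterisation -----

theorem pvA_k_eq (T : List Int) (i j : Int) (ks : List Int) :
    pvA_k T i j ks = true ↔
      ∃ k ∈ ks, ¬(k = j ∨ k = i) ∧ pvAGet T i = pvAGet T j + pvAGet T k := by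
  induction ks with
  | nil => simp [pvA_k]
  | cons k ks ih =>
    simp only [pvA_k]
    split_ifs with h1 h2
    · simp [ih]
      tauto
    · exact iff_of_true rfl ⟨k, by simp, h1, h2⟩
    · simp [ih, h2]

theorem pvA_j_eq (T : List Int) (i : Int) (js : List Int) :
    pvA_j T i js = true ↔
      ∃ j ∈ js, j ≠ i ∧ pvA_k T i j (PySem.List.pyRange 0 (T.length : Int) 1) = true := by
  induction js with
  | nil => simp [pvA_j]
  | cons j js ih =>
    simp only [pvA_j]
    split_ifs with h1 h2
    · simp [ih, h1]
    · exact iff_of_true rfl ⟨j, by simp, h1, h2⟩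
    · simp [ih, h2]

theorem pvA_i_eq (T : List Int) (is : List Int) :
    pvA_i T is = true ↔
      ∀ i ∈ is, pvA_j T i (PySem.List.pyRange 0 (T.length : Int) 1) = true := by
  induction is with
  | nil => simp [pvA_i]
  | cons i is ih =>
    simp only [pvA_i]
    split_ifs with h1
    · simp [ih, h1]
    · simp [h1]

theorem nuber_A_eq (T : List Int) :
    nuber_as_as_sum_others T = true ↔
      ∀ i : Nat, (hi : i < T.length) →
        ∃ j k : Nat, ∃ hj : j < T.length, ∃ hk : k < T.length,
          j ≠ i ∧ k ≠ i ∧ k ≠ j ∧ T[i] = T[j] + T[k] := by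
  unfold nuber_as_as_sum_others
  rw [pvA_i_eq]
  constructor
  · intro h i hi
    have hmem : (i : Int) ∈ PySem.List.pyRange 0 (T.length : Int) 1 :=
      PySem.List.mem_pyRange_one.mpr ⟨Int.natCast_nonneg i, by exact_mod_cast hi⟩
    rcases (pvA_j_eq T i _).mp (h _ hmem) with ⟨j, hjmem, hji, hk⟩
    rcases (pvA_k_eq T i j _).mp hk with ⟨k, hkmem, hkne, heq⟩
    obtain ⟨hj0, hjlt⟩ := PySem.List.mem_pyRange_one.mp hjmem
    obtain ⟨hk0, hklt⟩ := PySem.List.mem_pyRange_one.mp hkmem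
    push_neg at hkne
    refine ⟨j.toNat, k.toNat, by omega, by omega, by omega, by omega, by omega, ?_⟩
    have e1 : pvAGet T (i : Int) = T[((i : Int)).toNat] :=
      PySem.List.pyGetD_eq_getElem T 0 (Int.natCast_nonneg i) (by exact_mod_cast hi)
    have e2 : pvAGet T j = T[j.toNat] := PySem.List.pyGetD_eq_getElem T 0 hj0 (by omega)
    have e3 : pvAGet T k = T[k.toNat] := PySem.List.pyGetD_eq_getElem T 0 hk0 (by omega)
    rw [e1, e2, e3] at heq
    simpa using heq
  · intro h i hi
    obtain ⟨hi0, hilt⟩ := PySem.List.mem_pyRange_one.mp hi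
    obtain ⟨j, k, hj, hk, hji, hki, hkj, heq⟩ := h i.toNat (by omega)
    apply (pvA_j_eq T i _).mpr
    refine ⟨(j : Int), PySem.List.mem_pyRange_one.mpr ⟨Int.natCast_nonneg j, by omega⟩, by omega, ?_⟩
    apply (pvA_k_eq T i (j : Int) _).mpr
    refine ⟨(k : Int), PySem.List.mem_pyRange_one.mpr ⟨Int.natCast_nonneg k, by omega⟩, by omega, ?_⟩
    have e1 : pvAGet T i = T[i.toNat] := PySem.List.pyGetD_eq_getElem T 0 hi0 hilt
    have e2 : pvAGet T (j : Int) = T[((j : Int)).toNat] :=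
      PySem.List.pyGetD_eq_getElem T 0 (Int.natCast_nonneg j) (by omega)
    have e3 : pvAGet T (k : Int) = T[((k : Int)).toNat] :=
      PySem.List.pyGetD_eq_getElem T 0 (Int.natCast_nonneg k) (by omega)
    rw [e1, e2, e3]
    simpa using heq

-- ----- counting lemmas -----

theorem count_eraseIdx_add (T : List Int) (i : Nat) (hi : i < T.length) (v : Int) :
    (T.eraseIdx i).count v + (if T[i] = v then 1 else 0) = T.count v := by
  induction T generalizing i with
  | nil => simp at hi
  | cons h t ih =>
    cases i with
    | zero => simp [List.count_cons]
    | succ i =>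
      simp only [List.eraseIdx_cons_succ, List.count_cons, List.getElem_cons_succ]
      rw [← ih i (by simpa using hi)]
      split_ifs <;> omega

theorem pvShift (T : List Int) (i m : Nat) (hi : i < T.length) (hm : m < T.length)
    (hne : m ≠ i) :
    ∃ p, ∃ hp : p < (T.eraseIdx i).length,
      p = (if m < i then m else m - 1) ∧ (T.eraseIdx i)[p] = T[m] := by
  have hlen : (T.eraseIdx i).length = T.length - 1 := by
    simp [List.length_eraseIdx, hi]
  by_cases hmi : m < i
  · refine ⟨m, by omega, by simp [hmi], ?_⟩
    rw [List.getElem_eraseIdx]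
    rw [dif_pos hmi]
  · refine ⟨m - 1, by omega, by simp [hmi], ?_⟩
    rw [List.getElem_eraseIdx]
    rw [dif_neg (by omega)]
    simp only [show m - 1 + 1 = m from by omega]

theorem exists_idx_ne (T : List Int) (i : Nat) (hi : i < T.length) (v : Int) :
    (∃ m : Nat, ∃ hm : m < T.length, m ≠ i ∧ T[m] = v) ↔ v ∈ T.eraseIdx i := by
  have hlen : (T.eraseIdx i).length = T.length - 1 := by
    simp [List.length_eraseIdx, hi]
  constructor
  · rintro ⟨m, hm, hne, hval⟩
    obtain ⟨p, hp, _, pval⟩ := pvShift T i m hi hm hne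
    exact List.mem_iff_getElem.mpr ⟨p, hp, by rw [pval]; exact hval⟩
  · intro hv
    rcases List.mem_iff_getElem.mp hv with ⟨p, hp, hval⟩
    rw [List.getElem_eraseIdx] at hval
    split_ifs at hval with h1
    · exact ⟨p, by omega, by omega, hval⟩
    · exact ⟨p + 1, by omega, by omega, hval⟩

theorem two_count_iff (L : List Int) (v : Int) :
    (∃ p q : Nat, ∃ hp : p < L.length, ∃ hq : q < L.length, p ≠ q ∧ L[p] = v ∧ L[q] = v) ↔
      2 ≤ L.count v := by
  induction L with
  | nil => simp
  | cons y t ih =>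
    have hcc : (y :: t).count v = t.count v + if y = v then 1 else 0 := by
      by_cases h : y = v
      · simp [List.count_cons, h]
      · simp [List.count_cons, h, Ne.symm h]
    rw [hcc]
    constructor
    · rintro ⟨p, q, hp, hq, hpq, vp, vq⟩
      match p, q with
      | 0, 0 => omega
      | 0, q + 1 =>
        simp only [List.getElem_cons_zero] at vp
        simp only [List.getElem_cons_succ] at vq
        have hmem : v ∈ t := List.mem_iff_getElem.mpr ⟨q, by simpa using hq, vq⟩
        have h1 := List.one_le_count_iff.mpr hmem
        rw [if_pos vp]
        omega
      | p + 1, 0 =>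
        simp only [List.getElem_cons_zero] at vq
        simp only [List.getElem_cons_succ] at vp
        have hmem : v ∈ t := List.mem_iff_getElem.mpr ⟨p, by simpa using hp, vp⟩
        have h1 := List.one_le_count_iff.mpr hmem
        rw [if_pos vq]
        omega
      | p + 1, q + 1 =>
        have h2 := ih.mp ⟨p, q, by simpa using hp, by simpa using hq, by omega,
          by simpa using vp, by simpa using vq⟩
        split_ifs <;> omega
    · intro hc
      by_cases hy : y = v
      · rw [if_pos hy] at hc
        have hmem : v ∈ t := List.one_le_count_iff.mp (by omega)
        rcases List.mem_iff_getElem.mp hmem with ⟨q, hq, hval⟩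
        exact ⟨0, q + 1, by simp, by simpa using hq, by omega, by simpa using hy,
          by simpa using hval⟩
      · rw [if_neg hy] at hc
        rcases ih.mpr (by omega) with ⟨p, q, hp, hq, hpq, vp, vq⟩
        exact ⟨p + 1, q + 1, by simpa using hp, by simpa using hq, by omega,
          by simpa using vp, by simpa using vq⟩

theorem exists_two_idx_ne (T : List Int) (i : Nat) (hi : i < T.length) (a b : Int) :
    (∃ j k : Nat, ∃ hj : j < T.length, ∃ hk : k < T.length,
        j ≠ i ∧ k ≠ i ∧ k ≠ j ∧ T[j] = a ∧ T[k] = b) ↔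
      (∃ p q : Nat, ∃ hp : p < (T.eraseIdx i).length, ∃ hq : q < (T.eraseIdx i).length,
        p ≠ q ∧ (T.eraseIdx i)[p] = a ∧ (T.eraseIdx i)[q] = b) := by
  have hlen : (T.eraseIdx i).length = T.length - 1 := by
    simp [List.length_eraseIdx, hi]
  constructor
  · rintro ⟨j, k, hj, hk, hji, hki, hkj, va, vb⟩
    obtain ⟨p, hp, pe, pval⟩ := pvShift T i j hi hj hji
    obtain ⟨q, hq, qe, qval⟩ := pvShift T i k hi hk hki
    refine ⟨p, q, hp, hq, ?_, by rw [pval]; exact va, by rw [qval]; exact vb⟩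
    split_ifs at pe qe <;> omega
  · rintro ⟨p, q, hp, hq, hpq, va, vb⟩
    rw [List.getElem_eraseIdx] at va vb
    split_ifs at va with h1 <;> split_ifs at vb with h2
    · exact ⟨p, q, by omega, by omega, by omega, by omega, by omega, va, vb⟩
    · exact ⟨p, q + 1, by omega, by omega, by omega, by omega, by omega, va, vb⟩
    · exact ⟨p + 1, q, by omega, by omega, by omega, by omega, by omega, va, vb⟩
    · exact ⟨p + 1, q + 1, by omega, by omega, by omega, by omega, by omega, va, vb⟩

theorem availZ_eq (T : List Int) (i : Nat) (hi : i < T.length) (v : Int) :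
    pvAvailZ T T[i] v = ((T.eraseIdx i).count v : Int) := by
  have h := count_eraseIdx_add T i hi v
  unfold pvAvailZ
  split_ifs at h ⊢ with h1 h2 h2 <;> simp_all <;> omega

-- per-element bridge: A's index condition at i equals pvQ at the value T[i]
theorem bridge (T : List Int) (i : Nat) (hi : i < T.length) :
    (∃ j k : Nat, ∃ hj : j < T.length, ∃ hk : k < T.length,
        j ≠ i ∧ k ≠ i ∧ k ≠ j ∧ T[i] = T[j] + T[k]) ↔ pvQ T T[i] := by
  constructor
  · rintro ⟨j, k, hj, hk, hji, hki, hkj, heq⟩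
    refine ⟨T[j], List.getElem_mem hj, ?_⟩
    have hb : T[k] = T[i] - T[j] := by omega
    split_ifs with hab
    · rw [availZ_eq T i hi]
      have h2 : 2 ≤ (T.eraseIdx i).count T[j] :=
        (two_count_iff _ _).mp ((exists_two_idx_ne T i hi T[j] T[j]).mp
          ⟨j, k, hj, hk, hji, hki, hkj, rfl, by omega⟩)
      exact_mod_cast h2
    · rw [availZ_eq T i hi, availZ_eq T i hi]
      have ha1 : T[j] ∈ T.eraseIdx i :=
        (exists_idx_ne T i hi _).mp ⟨j, hj, hji, rfl⟩
      have hb1 : T[i] - T[j] ∈ T.eraseIdx i :=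
        (exists_idx_ne T i hi _).mp ⟨k, hk, hki, hb⟩
      refine ⟨?_, ?_⟩
      · exact_mod_cast List.one_le_count_iff.mpr ha1
      · exact_mod_cast List.one_le_count_iff.mpr hb1
  · rintro ⟨a, haT, hcond⟩
    split_ifs at hcond with hab
    · rw [availZ_eq T i hi] at hcond
      have h2 : 2 ≤ (T.eraseIdx i).count a := by exact_mod_cast hcond
      rcases (two_count_iff _ _).mpr h2 with ⟨p, q, hp, hq, hpq, vp, vq⟩
      rcases (exists_two_idx_ne T i hi a a).mpr ⟨p, q, hp, hq, hpq, vp, vq⟩ with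
        ⟨j, k, hj, hk, hji, hki, hkj, va, vb⟩
      exact ⟨j, k, hj, hk, hji, hki, hkj, by omega⟩
    · rw [availZ_eq T i hi, availZ_eq T i hi] at hcond
      obtain ⟨h1, h2⟩ := hcond
      have ha1 : a ∈ T.eraseIdx i := List.one_le_count_iff.mp (by exact_mod_cast h1)
      have hb1 : T[i] - a ∈ T.eraseIdx i := List.one_le_count_iff.mp (by exact_mod_cast h2)
      rcases List.mem_iff_getElem.mp ha1 with ⟨p, hp, vp⟩
      rcases List.mem_iff_getElem.mp hb1 with ⟨q, hq, vq⟩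
      have hpq : p ≠ q := by
        intro h
        subst h
        rw [vp] at vq
        omega
      rcases (exists_two_idx_ne T i hi a (T[i] - a)).mpr ⟨p, q, hp, hq, hpq, vp, vq⟩ with
        ⟨j, k, hj, hk, hji, hki, hkj, va, vb⟩
      exact ⟨j, k, hj, hk, hji, hki, hkj, by omega⟩

-- ----- B-side characterisation -----

theorem pvB_counts_eq (T : List Int) :
    T.foldl (fun d v => d.insert v (d.getD v 0 + 1)) PySem.Dict.empty = PySem.Dict.counter T :=
  PySem.Dict.foldl_insert_getD_add_one_eq_counter T

theorem pvB_inner_eq (T : List Int) (x : Int) (l : List Int) :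
    pvB_inner (PySem.Dict.counter T) x l = true ↔
      ∃ a ∈ l, (if a = x - a then 2 ≤ pvAvailZ T x a
                else 1 ≤ pvAvailZ T x a ∧ 1 ≤ pvAvailZ T x (x - a)) := by
  have havail : ∀ v, pvBAvail (PySem.Dict.counter T) x v = pvAvailZ T x v := by
    intro v
    simp [pvBAvail, pvAvailZ, PySem.Dict.getD_counter]
  induction l with
  | nil => simp [pvB_inner]
  | cons a as ih =>
    simp only [pvB_inner, havail]
    split_ifs with h1 h2 h2
    · exact iff_of_true rfl ⟨a, by simp, by rw [if_pos h1]; exact h2⟩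
    · apply Iff.trans ih
      constructor
      · rintro ⟨c, hc, hcond⟩
        exact ⟨c, by simp [hc], hcond⟩
      · rintro ⟨c, hc, hcond⟩
        rcases List.mem_cons.mp hc with rfl | hc
        · rw [if_pos h1] at hcond
          exact absurd hcond h2
        · exact ⟨c, hc, hcond⟩
    · exact iff_of_true rfl ⟨a, by simp, by rw [if_neg h1]; exact h2⟩
    · apply Iff.trans ih
      constructor
      · rintro ⟨c, hc, hcond⟩
        exact ⟨c, by simp [hc], hcond⟩
      · rintro ⟨c, hc, hcond⟩
        rcases List.mem_cons.mp hc with rfl | hc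
        · rw [if_neg h1] at hcond
          exact absurd hcond h2
        · exact ⟨c, hc, hcond⟩

theorem pvB_outer_eq (T : List Int) (xs : List Int) :
    pvB_outer (PySem.Dict.counter T) xs = true ↔ ∀ x ∈ xs, pvQ T x := by
  have hkeys : (PySem.Dict.counter T).keys = PySem.Set.ofList T := PySem.Dict.keys_counter T
  have hinner : ∀ x, pvB_inner (PySem.Dict.counter T) x (PySem.Dict.counter T).keys = true ↔ pvQ T x := by
    intro x
    rw [hkeys, pvB_inner_eq]
    unfold pvQ
    constructor
    · rintro ⟨a, ha, hc⟩
      exact ⟨a, (PySem.Set.mem_ofList T a).mp ha, hc⟩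
    · rintro ⟨a, ha, hc⟩
      exact ⟨a, (PySem.Set.mem_ofList T a).mpr ha, hc⟩
  induction xs with
  | nil => simp [pvB_outer]
  | cons x xs ih =>
    simp only [pvB_outer]
    split_ifs with h1
    · apply Iff.trans ih
      have hx := (hinner x).mp h1
      constructor
      · intro h y hy
        rcases List.mem_cons.mp hy with rfl | hy
        · exact hx
        · exact h y hy
      · intro h y hy
        exact h y (by simp [hy])
    · simp only [Bool.false_eq_true, false_iff]
      intro h
      exact h1 ((hinner x).mpr (h x (by simp)))

theorem nuber_B_eq (T : List Int) :
    nuber_as_as_sum_others_alt T = true ↔ ∀ x ∈ T, pvQ T x := by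
  unfold nuber_as_as_sum_others_alt
  rw [pvB_counts_eq]
  exact pvB_outer_eq T T

-- ===== VERDICT (by name: the statement is the Claim_ definition above) =====
theorem nuber_as_as_sum_others_spec : Claim_equal_nuber_as_as_sum_others := by
  intro T _
  unfold Spec_nuber_as_as_sum_others
  have hA := nuber_A_eq T
  have hB := nuber_B_eq T
  by_cases hb : nuber_as_as_sum_others_alt T = true
  · rw [hb]
    apply hA.mpr
    intro i hi
    exact (bridge T i hi).mpr (hB.mp hb T[i] (List.getElem_mem hi))
  · have ha : nuber_as_as_sum_others T ≠ true := by
      intro ha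
      apply hb
      apply hB.mpr
      intro x hx
      rcases List.mem_iff_getElem.mp hx with ⟨i, hi, rfl⟩
      exact (bridge T i hi).mp (hA.mp ha i hi)
    simp only [ne_eq, Bool.not_eq_true] at ha hb
    rw [ha, hb]
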